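-- pv_equiv track=rewrite | github.com/Akhila-1703/CompetitorTracker | summarizer.py | _enhance_strategic_insight
-- ===== SOURCE A (Python) =====
-- from typing import Dict, Optional, List
--
-- def _enhance_strategic_insight(competitor: str, original_insight: str, bullets: List[str]) -> str:
--     """Enhance strategic insight to be more specific and actionable."""
--     if not original_insight or "regular updates" in original_insight.lower():
--         # Generate better insight based on bullets
--         themes = []
--         bullet_text = " ".join(bullets).lower()
--
--         if any(word in bullet_text for word in ["ai", "automation", "smart"]):
--             themes.append("AI-powered features")
--         if any(word in bullet_text for word in ["ui", "design", "interface"]):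
--             themes.append("user experience improvements")
--         if any(word in bullet_text for word in ["api", "integration"]):
--             themes.append("platform connectivity")
--         if any(word in bullet_text for word in ["pricing", "plan", "subscription"]):
--             themes.append("monetization strategy")
--
--         if themes:
--             main_theme = themes[0]
--             return f"This shift toward {main_theme} suggests {competitor} is positioning for competitive differentiation in the evolving market landscape."
--
--     # Clean up vague language
--     enhanced = original_insight.replace("continues regular updates", "demonstrates strategic focus")
--     enhanced = enhanced.replace("various improvements", "targeted enhancements")
--
--     return enhanced
-- ===== SOURCE B (Python) =====
-- from typing import List
--
-- # keyword -> theme index, flattened; themes indexed by priority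
-- _KEYWORD_THEMES = [
--     ("ai", 0), ("automation", 0), ("smart", 0),
--     ("ui", 1), ("design", 1), ("interface", 1),
--     ("api", 2), ("integration", 2),
--     ("pricing", 3), ("plan", 3), ("subscription", 3),
-- ]
-- _THEMES = ["AI-powered features", "user experience improvements",
--            "platform connectivity", "monetization strategy"]
--
-- def _best_theme_index(text: str) -> int:
--     """Single sweep over the text: at each position, check which keywords
--     start there and keep the smallest theme index seen; 4 means none."""
--     best = 4
--     for i in range(len(text)):
--         for kw, t in _KEYWORD_THEMES:
--             if t < best and text.startswith(kw, i):
--                 best = t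
--     return best
--
-- def _enhance_strategic_insight(competitor: str, original_insight: str, bullets: List[str]) -> str:
--     """Enhance strategic insight to be more specific and actionable."""
--     if not original_insight or "regular updates" in original_insight.lower():
--         best = _best_theme_index(" ".join(bullets).lower())
--         if best < 4:
--             return f"This shift toward {_THEMES[best]} suggests {competitor} is positioning for competitive differentiation in the evolving market landscape."
--     enhanced = original_insight.replace("continues regular updates", "demonstrates strategic focus")
--     return enhanced.replace("various improvements", "targeted enhancements")
-- ===== Notes on version B (the rewrite author's own statement) =====
-- stated objective: alternative
-- what changed: A runs ten independent substring searches ('word in text') to build a theme list and reads its head; B makes one left-to-right sweep over the positions of the joined text, testing at each position which keywords start there and keeping the minimal theme index.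
import Mathlib
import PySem

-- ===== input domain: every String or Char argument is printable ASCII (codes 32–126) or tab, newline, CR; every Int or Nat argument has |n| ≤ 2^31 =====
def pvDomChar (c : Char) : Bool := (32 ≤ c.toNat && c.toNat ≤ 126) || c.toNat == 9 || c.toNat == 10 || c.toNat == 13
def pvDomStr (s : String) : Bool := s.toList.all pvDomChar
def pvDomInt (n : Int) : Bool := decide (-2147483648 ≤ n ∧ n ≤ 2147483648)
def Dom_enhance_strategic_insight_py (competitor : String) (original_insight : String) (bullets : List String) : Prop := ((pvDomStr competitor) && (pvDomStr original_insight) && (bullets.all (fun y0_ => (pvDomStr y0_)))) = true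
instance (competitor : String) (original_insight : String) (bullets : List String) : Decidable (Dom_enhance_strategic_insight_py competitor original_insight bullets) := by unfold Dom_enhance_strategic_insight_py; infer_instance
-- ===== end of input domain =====

-- B replaces A's four independent substring-search blocks (ten `in` scans building a theme list read at index 0)
-- by one left-to-right sweep over the joined text that keeps the minimal matching theme index (alternative decomposition, same cost class).

-- ===== PORT A =====
def enhance_strategic_insight_py (competitor : String) (original_insight : String) (bullets : List String) : String :=
  if original_insight == "" || PySem.Str.isIn "regular updates" (PySem.Str.lower original_insight) then
    let bullet_text := PySem.Str.lower (PySem.Str.join " " bullets)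
    let themes : List String := []
    let themes := if ["ai", "automation", "smart"].any (fun w => PySem.Str.isIn w bullet_text) then themes ++ ["AI-powered features"] else themes
    let themes := if ["ui", "design", "interface"].any (fun w => PySem.Str.isIn w bullet_text) then themes ++ ["user experience improvements"] else themes
    let themes := if ["api", "integration"].any (fun w => PySem.Str.isIn w bullet_text) then themes ++ ["platform connectivity"] else themes
    let themes := if ["pricing", "plan", "subscription"].any (fun w => PySem.Str.isIn w bullet_text) then themes ++ ["monetization strategy"] else themes
    match themes with
    | main_theme :: _ =>
        "This shift toward " ++ main_theme ++ " suggests " ++ competitor ++ " is positioning for competitive differentiation in the evolving market landscape."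
    | [] =>
        PySem.Str.replace (PySem.Str.replace original_insight "continues regular updates" "demonstrates strategic focus") "various improvements" "targeted enhancements"
  else
    PySem.Str.replace (PySem.Str.replace original_insight "continues regular updates" "demonstrates strategic focus") "various improvements" "targeted enhancements"

-- ===== PORT B =====
def pvKeywordThemes : List (String × Nat) :=
  [("ai", 0), ("automation", 0), ("smart", 0),
   ("ui", 1), ("design", 1), ("interface", 1),
   ("api", 2), ("integration", 2),
   ("pricing", 3), ("plan", 3), ("subscription", 3)]

def pvThemes : List String :=
  ["AI-powered features", "user experience improvements", "platform connectivity", "monetization strategy"]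

-- _best_theme_index: one sweep over the positions of the text, keeping the smallest matching theme index (4 = none).
-- text.startswith(kw, i) is ported as PySem.Chars.startswith on the i-th suffix (exact: both test kw as prefix at position i).
def pvBestThemeIndex (text : List Char) : Nat :=
  (List.range text.length).foldl (fun best i =>
    pvKeywordThemes.foldl (fun best p =>
      if p.2 < best && PySem.Chars.startswith (List.drop i text) p.1.toList then p.2 else best) best) 4

def enhance_strategic_insight_py_alt (competitor : String) (original_insight : String) (bullets : List String) : String :=
  if original_insight == "" || PySem.Str.isIn "regular updates" (PySem.Str.lower original_insight) then
    let best := pvBestThemeIndex (PySem.Str.lower (PySem.Str.join " " bullets)).toList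
    if best < 4 then
      "This shift toward " ++ pvThemes.getD best "" ++ " suggests " ++ competitor ++ " is positioning for competitive differentiation in the evolving market landscape."
    else
      PySem.Str.replace (PySem.Str.replace original_insight "continues regular updates" "demonstrates strategic focus") "various improvements" "targeted enhancements"
  else
    PySem.Str.replace (PySem.Str.replace original_insight "continues regular updates" "demonstrates strategic focus") "various improvements" "targeted enhancements"

-- ===== PRECONDITION & SPEC =====
def Spec_enhance_strategic_insight_py (competitor : String) (original_insight : String) (bullets : List String) (out : String) : Prop := out = enhance_strategic_insight_py_alt competitor original_insight bullets
instance (competitor : String) (original_insight : String) (bullets : List String) (out : String) : Decidable (Spec_enhance_strategic_insight_py competitor original_insight bullets out) := by unfold Spec_enhance_strategic_insight_py; infer_instance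

-- ===== CLAIM (what is proved, stated in full; the proofs are below) =====
def Claim_equal_enhance_strategic_insight_py : Prop := ∀ (competitor : String) (original_insight : String) (bullets : List String), Dom_enhance_strategic_insight_py competitor original_insight bullets → Spec_enhance_strategic_insight_py competitor original_insight bullets (enhance_strategic_insight_py competitor original_insight bullets)

-- ===== LEMMAS AND PROOFS =====

-- the inner keyword loop and the outer position loop of pvBestThemeIndex, named for the proofs
def pvInnerFold (text : List Char) (i : Nat) (ps : List (String × Nat)) (b : Nat) : Nat :=
  ps.foldl (fun best p =>
    if p.2 < best && PySem.Chars.startswith (List.drop i text) p.1.toList then p.2 else best) b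

def pvOuterFold (text : List Char) (L : List Nat) (b : Nat) : Nat :=
  L.foldl (fun best i => pvInnerFold text i pvKeywordThemes best) b

lemma pvBest_eq_outer (text : List Char) :
    pvBestThemeIndex text = pvOuterFold text (List.range text.length) 4 := rfl

lemma pvInnerFold_spec (text : List Char) (i : Nat) (ps : List (String × Nat)) :
    ∀ b : Nat,
      (pvInnerFold text i ps b = b ∨
        ∃ p ∈ ps, PySem.Chars.startswith (List.drop i text) p.1.toList = true ∧ p.2 = pvInnerFold text i ps b)
      ∧ pvInnerFold text i ps b ≤ b
      ∧ (∀ p ∈ ps, PySem.Chars.startswith (List.drop i text) p.1.toList = true → pvInnerFold text i ps b ≤ p.2) := by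
  induction ps with
  | nil => intro b; simp [pvInnerFold]
  | cons p ps ih =>
    intro b
    have hstep : pvInnerFold text i (p :: ps) b =
        pvInnerFold text i ps (if p.2 < b && PySem.Chars.startswith (List.drop i text) p.1.toList then p.2 else b) := rfl
    by_cases hsw : PySem.Chars.startswith (List.drop i text) p.1.toList = true
    · by_cases hlt : p.2 < b
      · have hb' : (if p.2 < b && PySem.Chars.startswith (List.drop i text) p.1.toList then p.2 else b) = p.2 := by
          simp [hsw, hlt]
        rw [hstep, hb']
        obtain ⟨h1, h2, h3⟩ := ih p.2
        refine ⟨?_, by omega, ?_⟩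
        · rcases h1 with h | ⟨q, hq, hqsw, hqv⟩
          · exact Or.inr ⟨p, List.mem_cons_self .., hsw, h.symm⟩
          · exact Or.inr ⟨q, List.mem_cons_of_mem _ hq, hqsw, hqv⟩
        · intro q hq hqsw
          rcases List.mem_cons.mp hq with rfl | hq
          · omega
          · exact h3 q hq hqsw
      · have hb' : (if p.2 < b && PySem.Chars.startswith (List.drop i text) p.1.toList then p.2 else b) = b := by
          simp [hsw, hlt]
        rw [hstep, hb']
        obtain ⟨h1, h2, h3⟩ := ih b
        refine ⟨?_, h2, ?_⟩
        · rcases h1 with h | ⟨q, hq, hqsw, hqv⟩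
          · exact Or.inl h
          · exact Or.inr ⟨q, List.mem_cons_of_mem _ hq, hqsw, hqv⟩
        · intro q hq hqsw
          rcases List.mem_cons.mp hq with rfl | hq
          · omega
          · exact h3 q hq hqsw
    · have hb' : (if p.2 < b && PySem.Chars.startswith (List.drop i text) p.1.toList then p.2 else b) = b := by
        simp [hsw]
      rw [hstep, hb']
      obtain ⟨h1, h2, h3⟩ := ih b
      refine ⟨?_, h2, ?_⟩
      · rcases h1 with h | ⟨q, hq, hqsw, hqv⟩
        · exact Or.inl h
        · exact Or.inr ⟨q, List.mem_cons_of_mem _ hq, hqsw, hqv⟩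
      · intro q hq hqsw
        rcases List.mem_cons.mp hq with rfl | hq
        · exact absurd hqsw hsw
        · exact h3 q hq hqsw

lemma pvOuterFold_spec (text : List Char) (L : List Nat) :
    ∀ b : Nat,
      (pvOuterFold text L b = b ∨
        ∃ i ∈ L, ∃ p ∈ pvKeywordThemes, PySem.Chars.startswith (List.drop i text) p.1.toList = true ∧ p.2 = pvOuterFold text L b)
      ∧ pvOuterFold text L b ≤ b
      ∧ (∀ i ∈ L, ∀ p ∈ pvKeywordThemes, PySem.Chars.startswith (List.drop i text) p.1.toList = true → pvOuterFold text L b ≤ p.2) := by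
  induction L with
  | nil => intro b; simp [pvOuterFold]
  | cons i L ih =>
    intro b
    have hstep : pvOuterFold text (i :: L) b = pvOuterFold text L (pvInnerFold text i pvKeywordThemes b) := by
      simp only [pvOuterFold, pvInnerFold, List.foldl_cons]
    obtain ⟨g1, g2, g3⟩ := pvInnerFold_spec text i pvKeywordThemes b
    obtain ⟨h1, h2, h3⟩ := ih (pvInnerFold text i pvKeywordThemes b)
    rw [hstep]
    refine ⟨?_, by omega, ?_⟩
    · rcases h1 with h | ⟨j, hj, q, hq, hqsw, hqv⟩
      · rw [h]
        rcases g1 with h' | ⟨q, hq, hqsw, hqv⟩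
        · exact Or.inl h'
        · exact Or.inr ⟨i, List.mem_cons_self .., q, hq, hqsw, hqv⟩
      · exact Or.inr ⟨j, List.mem_cons_of_mem _ hj, q, hq, hqsw, hqv⟩
    · intro j hj q hq hqsw
      rcases List.mem_cons.mp hj with rfl | hj
      · exact le_trans h2 (g3 q hq hqsw)
      · exact h3 j hj q hq hqsw

lemma pvBest_le (text : List Char) {i : Nat} (hi : i < text.length) {p : String × Nat}
    (hp : p ∈ pvKeywordThemes) (hsw : PySem.Chars.startswith (List.drop i text) p.1.toList = true) :
    pvBestThemeIndex text ≤ p.2 := by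
  rw [pvBest_eq_outer]
  exact (pvOuterFold_spec text (List.range text.length) 4).2.2 i (List.mem_range.mpr hi) p hp hsw

lemma pvBest_cases (text : List Char) :
    pvBestThemeIndex text = 4 ∨
      ∃ i, i < text.length ∧ ∃ p ∈ pvKeywordThemes,
        PySem.Chars.startswith (List.drop i text) p.1.toList = true ∧ p.2 = pvBestThemeIndex text := by
  rw [pvBest_eq_outer]
  rcases (pvOuterFold_spec text (List.range text.length) 4).1 with h | ⟨i, hi, p, hp, hsw, hv⟩
  · exact Or.inl h
  · exact Or.inr ⟨i, List.mem_range.mp hi, p, hp, hsw, hv⟩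

lemma pv_isIn_iff_sw (sub s : List Char) (h : sub ≠ []) :
    PySem.Chars.isIn sub s = true ↔ ∃ i, i < s.length ∧ PySem.Chars.startswith (List.drop i s) sub = true := by
  rw [← PySem.Chars.exists_prefix_drop_iff_isIn]
  constructor
  · rintro ⟨j, hj⟩
    by_cases hjl : j < s.length
    · exact ⟨j, hjl, (PySem.Chars.startswith_iff _ _).mpr hj⟩
    · exfalso
      rw [List.drop_eq_nil_of_le (le_of_not_gt hjl)] at hj
      exact h (List.prefix_nil.mp hj)
  · rintro ⟨i, _, hsw⟩
    exact ⟨i, (PySem.Chars.startswith_iff _ _).mp hsw⟩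

-- A's four group tests, indexed
def pvGroupAny (k : Nat) (s : String) : Bool :=
  match k with
  | 0 => ["ai", "automation", "smart"].any (fun w => PySem.Str.isIn w s)
  | 1 => ["ui", "design", "interface"].any (fun w => PySem.Str.isIn w s)
  | 2 => ["api", "integration"].any (fun w => PySem.Str.isIn w s)
  | 3 => ["pricing", "plan", "subscription"].any (fun w => PySem.Str.isIn w s)
  | _ => false

lemma pv_kw_imp_le (s : String) (w : String) (k : Nat) (hp : (w, k) ∈ pvKeywordThemes)
    (hw : w.toList ≠ []) (h : PySem.Str.isIn w s = true) : pvBestThemeIndex s.toList ≤ k := by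
  have h' : PySem.Chars.isIn w.toList s.toList = true := by
    rw [← PySem.Str.isIn_eq]; exact h
  obtain ⟨i, hi, hsw⟩ := (pv_isIn_iff_sw w.toList s.toList hw).mp h'
  exact pvBest_le s.toList hi hp hsw

lemma pv_groupAny_imp_le (k : Nat) (hk : k < 4) (s : String) (h : pvGroupAny k s = true) :
    pvBestThemeIndex s.toList ≤ k := by
  interval_cases k <;>
    simp only [pvGroupAny, List.any_cons, List.any_nil, Bool.or_eq_true, Bool.false_eq_true,
      or_false] at h
  · rcases h with h | h | h
    · exact pv_kw_imp_le s "ai" 0 (by simp [pvKeywordThemes]) (by decide) h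
    · exact pv_kw_imp_le s "automation" 0 (by simp [pvKeywordThemes]) (by decide) h
    · exact pv_kw_imp_le s "smart" 0 (by simp [pvKeywordThemes]) (by decide) h
  · rcases h with h | h | h
    · exact pv_kw_imp_le s "ui" 1 (by simp [pvKeywordThemes]) (by decide) h
    · exact pv_kw_imp_le s "design" 1 (by simp [pvKeywordThemes]) (by decide) h
    · exact pv_kw_imp_le s "interface" 1 (by simp [pvKeywordThemes]) (by decide) h
  · rcases h with h | h
    · exact pv_kw_imp_le s "api" 2 (by simp [pvKeywordThemes]) (by decide) h
    · exact pv_kw_imp_le s "integration" 2 (by simp [pvKeywordThemes]) (by decide) h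
  · rcases h with h | h | h
    · exact pv_kw_imp_le s "pricing" 3 (by simp [pvKeywordThemes]) (by decide) h
    · exact pv_kw_imp_le s "plan" 3 (by simp [pvKeywordThemes]) (by decide) h
    · exact pv_kw_imp_le s "subscription" 3 (by simp [pvKeywordThemes]) (by decide) h

lemma pv_sw_imp_groupAny (s : String) (p : String × Nat) (hp : p ∈ pvKeywordThemes) (i : Nat)
    (hi : i < s.toList.length) (hsw : PySem.Chars.startswith (List.drop i s.toList) p.1.toList = true) :
    pvGroupAny p.2 s = true := by
  fin_cases hp <;>
  · have hin := (pv_isIn_iff_sw _ _ (by decide)).mpr ⟨i, hi, hsw⟩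
    simp [pvGroupAny, PySem.Str.isIn_eq] at hin ⊢
    tauto

lemma pvKeywordThemes_snd_lt (p : String × Nat) (hp : p ∈ pvKeywordThemes) : p.2 < 4 := by
  fin_cases hp <;> decide

lemma pvBest_eq_chain (s : String) :
    pvBestThemeIndex s.toList =
      (if pvGroupAny 0 s then 0 else if pvGroupAny 1 s then 1
       else if pvGroupAny 2 s then 2 else if pvGroupAny 3 s then 3 else 4) := by
  cases h0 : pvGroupAny 0 s
  case true =>
    have hle := pv_groupAny_imp_le 0 (by omega) s h0
    simp [h0]; omega
  case false =>
  cases h1 : pvGroupAny 1 s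
  case true =>
    have hle := pv_groupAny_imp_le 1 (by omega) s h1
    rcases pvBest_cases s.toList with h4 | ⟨i, hi, p, hp, hsw, hv⟩
    · omega
    · have hg := pv_sw_imp_groupAny s p hp i hi hsw
      simp only [h0, h1, if_true, Bool.false_eq_true, if_false]
      have hb : p.2 ≤ 1 := hv ▸ hle
      rcases (show p.2 = 0 ∨ p.2 = 1 from by omega) with hpv | hpv <;> rw [hpv] at hg
      · rw [h0] at hg; exact absurd hg (by simp)
      · omega
  case false =>
  cases h2 : pvGroupAny 2 s
  case true =>
    have hle := pv_groupAny_imp_le 2 (by omega) s h2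
    rcases pvBest_cases s.toList with h4 | ⟨i, hi, p, hp, hsw, hv⟩
    · omega
    · have hg := pv_sw_imp_groupAny s p hp i hi hsw
      simp only [h0, h1, h2, if_true, Bool.false_eq_true, if_false]
      have hb : p.2 ≤ 2 := hv ▸ hle
      rcases (show p.2 = 0 ∨ p.2 = 1 ∨ p.2 = 2 from by omega) with hpv | hpv | hpv <;> rw [hpv] at hg
      · rw [h0] at hg; exact absurd hg (by simp)
      · rw [h1] at hg; exact absurd hg (by simp)
      · omega
  case false =>
  cases h3 : pvGroupAny 3 s
  case true =>
    have hle := pv_groupAny_imp_le 3 (by omega) s h3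
    rcases pvBest_cases s.toList with h4 | ⟨i, hi, p, hp, hsw, hv⟩
    · omega
    · have hg := pv_sw_imp_groupAny s p hp i hi hsw
      simp only [h0, h1, h2, h3, if_true, Bool.false_eq_true, if_false]
      have hb : p.2 ≤ 3 := hv ▸ hle
      rcases (show p.2 = 0 ∨ p.2 = 1 ∨ p.2 = 2 ∨ p.2 = 3 from by omega) with hpv | hpv | hpv | hpv <;> rw [hpv] at hg
      · rw [h0] at hg; exact absurd hg (by simp)
      · rw [h1] at hg; exact absurd hg (by simp)
      · rw [h2] at hg; exact absurd hg (by simp)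
      · omega
  case false =>
    rcases pvBest_cases s.toList with h4 | ⟨i, hi, p, hp, hsw, hv⟩
    · simp [h0, h1, h2, h3, h4]
    · have hg := pv_sw_imp_groupAny s p hp i hi hsw
      have hlt := pvKeywordThemes_snd_lt p hp
      rcases (show p.2 = 0 ∨ p.2 = 1 ∨ p.2 = 2 ∨ p.2 = 3 from by omega) with hpv | hpv | hpv | hpv <;> rw [hpv] at hg
      · rw [h0] at hg; exact absurd hg (by simp)
      · rw [h1] at hg; exact absurd hg (by simp)
      · rw [h2] at hg; exact absurd hg (by simp)
      · rw [h3] at hg; exact absurd hg (by simp)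

-- ===== VERDICT (by name: the statement is the Claim_ definition above) =====
theorem enhance_strategic_insight_py_spec : Claim_equal_enhance_strategic_insight_py := by
  intro competitor original_insight bullets _
  unfold Spec_enhance_strategic_insight_py enhance_strategic_insight_py enhance_strategic_insight_py_alt
  by_cases hg : (original_insight == "" || PySem.Str.isIn "regular updates" (PySem.Str.lower original_insight)) = true
  · simp only [hg, if_true]
    set s := PySem.Str.lower (PySem.Str.join " " bullets) with hs
    rw [pvBest_eq_chain s]
    have g0 : pvGroupAny 0 s = (["ai", "automation", "smart"].any fun w => PySem.Str.isIn w s) := rfl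
    have g1 : pvGroupAny 1 s = (["ui", "design", "interface"].any fun w => PySem.Str.isIn w s) := rfl
    have g2 : pvGroupAny 2 s = (["api", "integration"].any fun w => PySem.Str.isIn w s) := rfl
    have g3 : pvGroupAny 3 s = (["pricing", "plan", "subscription"].any fun w => PySem.Str.isIn w s) := rfl
    rw [g0, g1, g2, g3]
    cases h0 : (["ai", "automation", "smart"].any fun w => PySem.Str.isIn w s) <;>
    cases h1 : (["ui", "design", "interface"].any fun w => PySem.Str.isIn w s) <;>
    cases h2 : (["api", "integration"].any fun w => PySem.Str.isIn w s) <;>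
    cases h3 : (["pricing", "plan", "subscription"].any fun w => PySem.Str.isIn w s) <;>
    simp [pvThemes]
  · simp only [hg, Bool.false_eq_true, if_false]
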